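-- pv_equiv track=rewrite | github.com/wilmurillo-ai/Design-Assistant | .skills/openclaw-skills/skills/tianyima96/diffraction-scatter/lib/common.py | pick_default_dataset
-- ===== SOURCE A (Python) =====
-- from typing import Iterator, Optional
--
-- def pick_default_dataset(dataset_paths: list[str]) -> Optional[str]:
--     """Pick most likely image dataset. / 选择最可能的图像数据集。"""
--     if not dataset_paths:
--         return None
--     data_paths = [item for item in dataset_paths if item.endswith("/data") or item == "data"]
--     if data_paths:
--         data_paths.sort(key=lambda item: item.count("/"), reverse=True)
--         return data_paths[0]
--     return dataset_paths[0]
-- ===== SOURCE B (Python) =====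
-- def pick_default_dataset(dataset_paths):
--     """Pick most likely image dataset in one linear pass (no filtered list, no sort)."""
--     if not dataset_paths:
--         return None
--     best = None
--     best_count = -1
--     for item in dataset_paths:
--         if item.endswith("/data") or item == "data":
--             c = item.count("/")
--             if c > best_count:
--                 best = item
--                 best_count = c
--     if best is not None:
--         return best
--     return dataset_paths[0]
-- ===== Notes on version B (the rewrite author's own statement) =====
-- stated objective: alternative
-- what changed: Replaces building a filtered list and stably sorting it descending by slash count with a single linear pass that keeps the first candidate whose slash count strictly exceeds the best so far (ties resolved identically to the stable sort's head); fewer passes and no sort, but interpreted-loop constants mean no measured speedup.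
import Mathlib
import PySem

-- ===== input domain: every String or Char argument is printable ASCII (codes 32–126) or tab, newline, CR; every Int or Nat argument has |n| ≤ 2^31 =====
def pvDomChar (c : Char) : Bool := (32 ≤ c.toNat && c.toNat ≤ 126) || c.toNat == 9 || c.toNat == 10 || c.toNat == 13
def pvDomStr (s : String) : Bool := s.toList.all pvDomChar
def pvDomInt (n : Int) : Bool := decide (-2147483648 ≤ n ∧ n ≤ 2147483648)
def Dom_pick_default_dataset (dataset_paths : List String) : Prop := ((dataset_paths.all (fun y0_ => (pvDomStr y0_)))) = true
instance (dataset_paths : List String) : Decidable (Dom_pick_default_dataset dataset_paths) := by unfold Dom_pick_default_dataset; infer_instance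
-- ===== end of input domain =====

-- B replaces A's filter + stable descending sort with a single linear pass keeping the first path with the
-- strictly largest slash count (same result, including ties, because the stable sort puts the first maximum first).

-- ===== PORT A =====
def pick_default_dataset (dataset_paths : List String) : Option String :=
  match dataset_paths with
  | [] => none
  | d :: _ =>
    let data_paths := dataset_paths.filter
      (fun item => PySem.Str.endswith item "/data" || item == "data")
    match PySem.List.sorted data_paths (fun item => PySem.Str.count item "/") true with
    | m :: _ => some m
    | [] => some d

-- ===== PORT B =====
def pick_default_dataset_alt (dataset_paths : List String) : Option String :=
  match dataset_paths with
  | [] => none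
  | d :: _ =>
    let r := dataset_paths.foldl
      (fun (s : Option String × Int) item =>
        if PySem.Str.endswith item "/data" || item == "data" then
          let c : Int := (PySem.Str.count item "/" : Int)
          if c > s.2 then (some item, c) else s
        else s)
      (none, -1)
    match r.1 with
    | some best => some best
    | none => some d

-- ===== PRECONDITION & SPEC =====
def Spec_pick_default_dataset (dataset_paths : List String) (out : Option String) : Prop := out = pick_default_dataset_alt dataset_paths
instance (dataset_paths : List String) (out : Option String) : Decidable (Spec_pick_default_dataset dataset_paths out) := by unfold Spec_pick_default_dataset; infer_instance

-- ===== CLAIM (what is proved, stated in full; the proofs are below) =====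
def Claim_equal_pick_default_dataset : Prop := ∀ (dataset_paths : List String), Dom_pick_default_dataset dataset_paths → Spec_pick_default_dataset dataset_paths (pick_default_dataset dataset_paths)

-- ===== LEMMAS AND PROOFS =====

-- The running-strict-max step both programs boil down to (k = the slash-count key).
def pvStep (k : String → Nat) (b x : String) : String := if k b < k x then x else b

-- The head of the insertion-sort accumulator evolves exactly as the running strict max.
theorem head_foldl_insertBy (k : String → Nat) (xs : List String) : ∀ (h : String) (t : List String),
    (xs.foldl (fun acc x => PySem.List.insertBy (fun a b => decide (k b < k a)) x acc) (h :: t)).head?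
      = some (xs.foldl (pvStep k) h) := by
  induction xs with
  | nil => intro h t; rfl
  | cons x xs ih =>
    intro h t
    rw [List.foldl_cons, List.foldl_cons]
    show ((xs.foldl _ (if decide (k h < k x) = true then x :: h :: t
        else h :: PySem.List.insertBy (fun a b => decide (k b < k a)) x t)).head?)
      = some (xs.foldl (pvStep k) (if k h < k x then x else h))
    by_cases hc : k h < k x
    · rw [if_pos (by simpa using hc), if_pos hc]
      exact ih x (h :: t)
    · rw [if_neg (by simpa using hc), if_neg hc]
      exact ih h _

-- B's fold, once seeded with a first matching element, tracks the running strict max in its first component.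
theorem fold_best_eq (k : String → Nat) (t : List String) : ∀ (b : String),
    (t.foldl (fun (s : Option String × Int) x =>
        if ((k x : Int)) > s.2 then (some x, (k x : Int)) else s)
      (some b, (k b : Int))).1 = some (t.foldl (pvStep k) b) := by
  induction t with
  | nil => intro b; rfl
  | cons x t ih =>
    intro b
    rw [List.foldl_cons, List.foldl_cons]
    show (t.foldl _ (if ((k x : Int)) > ((k b : Int)) then (some x, (k x : Int))
        else (some b, (k b : Int)))).1
      = some (t.foldl (pvStep k) (if k b < k x then x else b))
    by_cases hc : k b < k x
    · rw [if_pos (by exact_mod_cast hc), if_pos hc]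
      exact ih x
    · rw [if_neg (by omega), if_neg hc]
      exact ih b

-- ===== VERDICT (by name: the statement is the Claim_ definition above) =====
theorem pick_default_dataset_spec : Claim_equal_pick_default_dataset := by
  intro dataset_paths _
  unfold Spec_pick_default_dataset pick_default_dataset pick_default_dataset_alt
  cases dataset_paths with
  | nil => rfl
  | cons d rest =>
    simp only
    rw [show
        ((d :: rest).foldl
          (fun (s : Option String × Int) item =>
            if PySem.Str.endswith item "/data" || item == "data" then
              if ((PySem.Str.count item "/" : Int)) > s.2 then (some item, (PySem.Str.count item "/" : Int)) else s
            else s) (none, -1))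
        = (((d :: rest).filter (fun item => PySem.Str.endswith item "/data" || item == "data")).foldl
            (fun (s : Option String × Int) x =>
              if ((PySem.Str.count x "/" : Int)) > s.2 then (some x, (PySem.Str.count x "/" : Int)) else s)
            (none, -1))
      from (List.foldl_filter ..).symm]
    cases hys : (d :: rest).filter (fun item => PySem.Str.endswith item "/data" || item == "data") with
    | nil => rfl
    | cons y t =>
      have hfold : (((y :: t).foldl
            (fun (s : Option String × Int) x =>
              if ((PySem.Str.count x "/" : Int)) > s.2 then (some x, (PySem.Str.count x "/" : Int)) else s)
            (none, -1))).1 = some (t.foldl (pvStep (fun item => PySem.Str.count item "/")) y) := by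
        rw [List.foldl_cons]
        show (t.foldl _ (if ((PySem.Str.count y "/" : Int)) > (-1 : Int)
            then (some y, (PySem.Str.count y "/" : Int)) else (none, -1))).1 = _
        rw [if_pos (by omega)]
        exact fold_best_eq (fun item => PySem.Str.count item "/") t y
      have hhead : (PySem.List.sorted (y :: t) (fun item => PySem.Str.count item "/") true).head?
          = some (t.foldl (pvStep (fun item => PySem.Str.count item "/")) y) := by
        rw [PySem.List.sorted_rev_eq_foldl_insertBy]
        exact head_foldl_insertBy (fun item => PySem.Str.count item "/") t y []
      rw [hfold]
      cases hsort : PySem.List.sorted (y :: t) (fun item => PySem.Str.count item "/") true with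
      | nil => rw [hsort] at hhead; exact absurd hhead (by simp)
      | cons m s =>
        rw [hsort] at hhead
        simp only [List.head?_cons, Option.some.injEq] at hhead
        simp [hhead]
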